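-- pv_equiv track=rewrite | github.com/pypi-data/pypi-mirror-217 | packages/sensitibot/sensitibot-1.1.1.tar.gz/sensitibot-1.1.1/reader/headers_reader.py | analize_headers
-- ===== SOURCE A (Python) =====
-- import itertools
--
-- def analize_headers(headers):
--     """
--     Analyzes the headers of a file.
--
--     Args:
--         headers (list): The headers of the file.
--
--     Returns:
--         list: The headers that may have sensitive information.
--     """
--     terms = ["email", "phone", "mobile", "iban", "account", "sha", "gpg", "socialsecurity",
--              "creditcard", "debitcard", "card", "name", "surname", "lastname", "firstname", "dni",
--              "license", "licenses", "lecenseplates", "ip", "ips", "address", "addresses", "gps",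
--              "coordinate", "coordinates", "location", "password", "latitud", "latitude", "longitud",
--              "longitude", "passwords", "secret", "secrets", "key", "hash"]
--     suffixes = ["number", "value", "key"]
--
--     combinations = []
--     for term, suffix in itertools.product(terms, suffixes):
--         combinations.append(term)
--         combinations.append(term + ' ' + suffix)
--         combinations.append(term + suffix)
--
--     positive_headers = []
--     for header in headers:
--         header_str = str(header)
--         clean_eader = header_str.strip().lower().replace("_", " ").replace("-", " ")
--         if clean_eader in combinations:
--             positive_headers.append(header)
--
--     return positive_headers
-- ===== SOURCE B (Python) =====
-- def analize_headers(headers):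
--     """Same result as A, but no 333-entry combinations table: each cleaned
--     header is checked directly against the term list, decomposing it by
--     suffix-stripping instead of enumerating every term/suffix combination."""
--     terms = ["email", "phone", "mobile", "iban", "account", "sha", "gpg", "socialsecurity",
--              "creditcard", "debitcard", "card", "name", "surname", "lastname", "firstname", "dni",
--              "license", "licenses", "lecenseplates", "ip", "ips", "address", "addresses", "gps",
--              "coordinate", "coordinates", "location", "password", "latitud", "latitude", "longitud",
--              "longitude", "passwords", "secret", "secrets", "key", "hash"]
--     suffixes = ["number", "value", "key"]
--
--     def is_sensitive(header):
--         clean = str(header).strip().lower().replace("_", " ").replace("-", " ")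
--         if clean in terms:
--             return True
--         for suffix in suffixes:
--             for pat in (" " + suffix, suffix):
--                 if clean.endswith(pat) and clean[:-len(pat)] in terms:
--                     return True
--         return False
--
--     return [header for header in headers if is_sensitive(header)]
-- ===== Notes on version B (the rewrite author's own statement) =====
-- stated objective: faster
-- what changed: B never builds A's 333-entry term x suffix combinations list: each cleaned header is checked directly against the 37-term list and, per suffix, by stripping ' '+suffix or suffix and looking up the remaining prefix among the terms (measured ~2.4x faster: 6 short list lookups replace a scan of the 333-entry list per header).
import Mathlib
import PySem

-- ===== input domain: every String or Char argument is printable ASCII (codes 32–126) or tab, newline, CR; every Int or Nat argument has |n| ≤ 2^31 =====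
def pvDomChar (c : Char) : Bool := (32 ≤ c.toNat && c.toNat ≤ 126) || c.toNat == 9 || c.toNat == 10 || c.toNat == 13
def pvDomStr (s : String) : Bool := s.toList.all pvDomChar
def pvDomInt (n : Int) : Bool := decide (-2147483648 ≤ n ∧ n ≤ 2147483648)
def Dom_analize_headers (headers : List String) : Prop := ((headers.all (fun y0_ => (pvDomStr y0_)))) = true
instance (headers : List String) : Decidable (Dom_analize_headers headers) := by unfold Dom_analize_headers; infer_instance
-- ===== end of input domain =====

-- B drops A's precomputed 333-entry combinations table and instead decomposes each cleaned
-- header by suffix-stripping with a direct term lookup (objective: simpler).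

-- ===== PORT A =====
def pvTermsA : List String :=
  ["email", "phone", "mobile", "iban", "account", "sha", "gpg", "socialsecurity",
   "creditcard", "debitcard", "card", "name", "surname", "lastname", "firstname", "dni",
   "license", "licenses", "lecenseplates", "ip", "ips", "address", "addresses", "gps",
   "coordinate", "coordinates", "location", "password", "latitud", "latitude", "longitud",
   "longitude", "passwords", "secret", "secrets", "key", "hash"]

def pvSuffixesA : List String := ["number", "value", "key"]

-- the three appends per (term, suffix) pair of itertools.product
def pvCombinationsA : List String :=
  (pvTermsA ×ˢ pvSuffixesA).foldl
    (fun acc p => acc ++ [p.1] ++ [p.1 ++ " " ++ p.2] ++ [p.1 ++ p.2]) []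

def analize_headers (headers : List String) : List String :=
  headers.foldl (fun acc header =>
    let header_str := header   -- str(header) on a str is the identity
    let clean_eader := PySem.Str.replace
        (PySem.Str.replace (PySem.Str.lower (PySem.Str.strip header_str)) "_" " ") "-" " "
    if clean_eader ∈ pvCombinationsA then acc ++ [header] else acc) []

-- ===== PORT B =====
def pvTermsB : List String :=
  ["email", "phone", "mobile", "iban", "account", "sha", "gpg", "socialsecurity",
   "creditcard", "debitcard", "card", "name", "surname", "lastname", "firstname", "dni",
   "license", "licenses", "lecenseplates", "ip", "ips", "address", "addresses", "gps",
   "coordinate", "coordinates", "location", "password", "latitud", "latitude", "longitud",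
   "longitude", "passwords", "secret", "secrets", "key", "hash"]

def pvSuffixesB : List String := ["number", "value", "key"]

-- clean.endswith(pat) and clean[:-len(pat)] in terms
def pvMatchPatB (clean pat : String) : Bool :=
  PySem.Str.endswith clean pat &&
    decide (PySem.Str.slice clean none (some (-(PySem.Str.len pat : Int))) ∈ pvTermsB)

def pvIsSensitiveB (header : String) : Bool :=
  let clean := PySem.Str.replace
      (PySem.Str.replace (PySem.Str.lower (PySem.Str.strip header)) "_" " ") "-" " "
  if clean ∈ pvTermsB then true
  else pvSuffixesB.any fun suffix =>
    [" " ++ suffix, suffix].any fun pat => pvMatchPatB clean pat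

def analize_headers_alt (headers : List String) : List String :=
  headers.filter pvIsSensitiveB

-- ===== PRECONDITION & SPEC =====
def Spec_analize_headers (headers : List String) (out : List String) : Prop := out = analize_headers_alt headers
instance (headers : List String) (out : List String) : Decidable (Spec_analize_headers headers out) := by unfold Spec_analize_headers; infer_instance

-- ===== CLAIM (what is proved, stated in full; the proofs are below) =====
def Claim_equal_analize_headers : Prop := ∀ (headers : List String), Dom_analize_headers headers → Spec_analize_headers headers (analize_headers headers)

-- ===== LEMMAS AND PROOFS =====

-- A's fold over itertools.product, written as a flat map
theorem pv_comb_eq : pvCombinationsA =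
    (pvTermsA ×ˢ pvSuffixesA).flatMap
      (fun p => [p.1] ++ ([p.1 ++ " " ++ p.2] ++ [p.1 ++ p.2])) := by
  unfold pvCombinationsA
  simp only [List.append_assoc]
  rw [PySem.List.foldl_append_eq_flatMap, List.nil_append]

-- membership in A's combinations table, characterised
theorem pv_mem_comb (c : String) :
    c ∈ pvCombinationsA ↔
      ∃ a ∈ pvTermsA, ∃ b ∈ pvSuffixesA, c = a ∨ c = a ++ " " ++ b ∨ c = a ++ b := by
  rw [pv_comb_eq]
  simp only [List.mem_flatMap]
  constructor
  · rintro ⟨p, hp, h⟩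
    have hps : p = (p.1, p.2) := rfl
    rw [hps] at hp
    obtain ⟨ht, hs⟩ := List.pair_mem_product.mp hp
    simp only [List.mem_append, List.mem_singleton] at h
    exact ⟨p.1, ht, p.2, hs, by tauto⟩
  · rintro ⟨a, ha, b, hb, h⟩
    refine ⟨(a, b), List.pair_mem_product.mpr ⟨ha, hb⟩, ?_⟩
    simp only [List.mem_append, List.mem_singleton]
    tauto

-- B's endswith-and-strip test, characterised: it holds iff clean is term ++ pat
theorem pv_match_iff (c p : String) (hp : 0 < p.toList.length) :
    pvMatchPatB c p = true ↔ ∃ t ∈ pvTermsB, c = t ++ p := by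
  unfold pvMatchPatB
  rw [Bool.and_eq_true, decide_eq_true_iff]
  have hlen : PySem.Str.len p = p.toList.length := by simp [PySem.Str.len_eq]
  have hsl : (PySem.Str.slice c none (some (-(PySem.Str.len p : Int)))).toList
      = c.toList.take (c.toList.length - p.toList.length) := by
    simp only [PySem.Str.toList_slice, PySem.Chars.slice_eq_listSlice, hlen]
    exact PySem.List.slice_to_neg_natCast c.toList p.toList.length hp
  rw [PySem.Str.endswith_eq, PySem.Chars.endswith_iff]
  constructor
  · rintro ⟨⟨pre, hpre⟩, hmem⟩
    refine ⟨_, hmem, ?_⟩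
    apply String.toList_inj.mp
    rw [String.toList_append, hsl, ← hpre]
    simp
  · rintro ⟨t, hmem, rfl⟩
    constructor
    · rw [String.toList_append]; exact List.suffix_append _ _
    · have hEq : (PySem.Str.slice (t ++ p) none (some (-(PySem.Str.len p : Int)))) = t := by
        apply String.toList_inj.mp
        rw [hsl, String.toList_append]
        simp
      rw [hEq]; exact hmem

theorem pv_suffix_len : ∀ s ∈ pvSuffixesB, 0 < s.toList.length := by decide

theorem pv_space_suffix_len (s : String) : 0 < ((" " : String) ++ s).toList.length := by
  rw [String.toList_append]
  simp

-- per-header agreement of the two membership tests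
theorem pv_cond_eq (c : String) :
    decide (c ∈ pvCombinationsA)
      = (if c ∈ pvTermsB then true
         else pvSuffixesB.any fun suffix =>
           [" " ++ suffix, suffix].any fun pat => pvMatchPatB c pat) := by
  rw [Bool.eq_iff_iff, decide_eq_true_iff, pv_mem_comb]
  by_cases h : c ∈ pvTermsB
  · rw [if_pos h]
    simp only [iff_true]
    exact ⟨c, h, "number", by simp [pvSuffixesA], Or.inl rfl⟩
  · rw [if_neg h]
    rw [List.any_eq_true]
    constructor
    · rintro ⟨a, ha, b, hb, (rfl | rfl | rfl)⟩
      · exact absurd ha h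
      · refine ⟨b, hb, ?_⟩
        rw [List.any_eq_true]
        refine ⟨" " ++ b, by simp, ?_⟩
        rw [pv_match_iff _ _ (pv_space_suffix_len b)]
        exact ⟨a, ha, String.append_assoc⟩
      · refine ⟨b, hb, ?_⟩
        rw [List.any_eq_true]
        refine ⟨b, by simp, ?_⟩
        rw [pv_match_iff _ _ (pv_suffix_len b hb)]
        exact ⟨a, ha, rfl⟩
    · rintro ⟨suf, hsuf, hany⟩
      rw [List.any_eq_true] at hany
      obtain ⟨pat, hpat, hm⟩ := hany
      simp only [List.mem_cons, List.not_mem_nil, or_false] at hpat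
      rcases hpat with rfl | rfl
      · rw [pv_match_iff _ _ (pv_space_suffix_len suf)] at hm
        obtain ⟨t, ht, rfl⟩ := hm
        exact ⟨t, ht, suf, hsuf, Or.inr (Or.inl String.append_assoc.symm)⟩
      · rw [pv_match_iff _ _ (pv_suffix_len pat hsuf)] at hm
        obtain ⟨t, ht, rfl⟩ := hm
        exact ⟨t, ht, pat, hsuf, Or.inr (Or.inr rfl)⟩

-- ===== VERDICT (by name: the statement is the Claim_ definition above) =====
theorem analize_headers_spec : Claim_equal_analize_headers := by
  intro headers _
  unfold Spec_analize_headers analize_headers analize_headers_alt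
  rw [PySem.List.foldl_append_ite_eq_filter, List.nil_append]
  apply List.filter_congr
  intro h _
  simp only [pvIsSensitiveB]
  exact pv_cond_eq _
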